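-- pv_equiv track=rewrite | github.com/oxygenum44/zpi | features.py | _term_count_in_sentence
-- ===== SOURCE A (Python) =====
-- def _term_count_in_sentence(sent):
--     """
--     This function calculate number of occurences for each word.
--     :param sent: one tweet as a list of words (tweet after tokenization)
--     :return: dictionary of pairs like (word, count(word))
--     """
--     freq_table = {}
--     for word in sent:
--         if word in freq_table:
--             freq_table[word] += 1
--         else:
--             freq_table[word] = 1
--
--     return freq_table
-- ===== SOURCE B (Python) =====
-- def _term_count_in_sentence(sent):
--     # Collect distinct words (first-occurrence order), then count each by rescanning.
--     return {word: sent.count(word) for word in dict.fromkeys(sent)}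
-- ===== Notes on version B (the rewrite author's own statement) =====
-- stated objective: idiomatic
-- what changed: Replaces the single-pass conditional dict accumulation with a two-phase comprehension: first collect the distinct words via dict.fromkeys, then rescan the whole list once per distinct word with list.count.
import Mathlib
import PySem

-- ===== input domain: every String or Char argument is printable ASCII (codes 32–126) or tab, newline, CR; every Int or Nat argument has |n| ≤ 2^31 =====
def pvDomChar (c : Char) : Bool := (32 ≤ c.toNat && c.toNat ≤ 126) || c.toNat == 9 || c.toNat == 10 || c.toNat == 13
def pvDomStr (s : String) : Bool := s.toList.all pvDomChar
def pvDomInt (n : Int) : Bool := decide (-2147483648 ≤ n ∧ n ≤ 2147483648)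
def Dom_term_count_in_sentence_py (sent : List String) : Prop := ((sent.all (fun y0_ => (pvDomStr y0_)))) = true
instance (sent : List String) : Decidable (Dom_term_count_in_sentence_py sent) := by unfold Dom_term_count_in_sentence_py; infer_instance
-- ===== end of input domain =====

-- B builds the result as "dedup then count each word" instead of A's one-pass dict accumulation (idiomatic; not faster).
-- ===== PORT A =====
-- for word in sent: if word in freq_table: freq_table[word] += 1 else: freq_table[word] = 1; return freq_table
def term_count_in_sentence_py (sent : List String) : List (String × Int) :=
  (sent.foldl (fun ft word =>
      if ft.contains word then ft.insert word (ft.getD word 0 + 1)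
      else ft.insert word 1) PySem.Dict.empty).items

-- ===== PORT B =====
-- {word: sent.count(word) for word in dict.fromkeys(sent)}
def term_count_in_sentence_py_alt (sent : List String) : List (String × Int) :=
  (PySem.List.dedup sent).map (fun word => (word, (sent.count word : Int)))

-- ===== PRECONDITION & SPEC =====
def Spec_term_count_in_sentence_py (sent : List String) (out : List (String × Int)) : Prop := out = term_count_in_sentence_py_alt sent
instance (sent : List String) (out : List (String × Int)) : Decidable (Spec_term_count_in_sentence_py sent out) := by unfold Spec_term_count_in_sentence_py; infer_instance

-- ===== CLAIM (what is proved, stated in full; the proofs are below) =====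
def Claim_equal_term_count_in_sentence_py : Prop := ∀ (sent : List String), Dom_term_count_in_sentence_py sent → Spec_term_count_in_sentence_py sent (term_count_in_sentence_py sent)

-- ===== LEMMAS AND PROOFS =====

-- A's loop body is extensionally the Counter step d.insert w (d.getD w 0 + 1).
lemma body_eq (ft : PySem.Dict String Int) (word : String) :
    (if ft.contains word then ft.insert word (ft.getD word 0 + 1)
     else ft.insert word 1) = ft.insert word (ft.getD word 0 + 1) := by
  split_ifs with h
  · rfl
  · have h0 : ft.get? word = none := (PySem.Dict.get?_eq_none_iff_contains ft word).mpr (by simpa using h)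
    simp [PySem.Dict.getD, h0]

-- ===== VERDICT (by name: the statement is the Claim_ definition above) =====
theorem term_count_in_sentence_py_spec : Claim_equal_term_count_in_sentence_py := by
  intro sent _
  unfold Spec_term_count_in_sentence_py term_count_in_sentence_py term_count_in_sentence_py_alt
  have h : (sent.foldl (fun ft word =>
      if ft.contains word then ft.insert word (ft.getD word 0 + 1)
      else ft.insert word 1) PySem.Dict.empty)
      = PySem.Dict.counter sent := by
    rw [← PySem.Dict.foldl_insert_getD_add_one_eq_counter]
    exact PySem.List.foldl_congr_mem _ _ _ _ (fun acc w _ => body_eq acc w)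
  rw [h, PySem.Dict.items_counter, PySem.List.dedup_eq_ofList]
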